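-- pv_equiv track=rewrite | github.com/minseokey/Baekjoon | 프로그래머스/3/258705. 산 모양 타일링/산 모양 타일링.py | solution
-- ===== SOURCE A (Python) =====
-- def solution(n, tops):
--     dp = [[0] * 4 for _ in range(n)]
--     if tops[0] == 0:
--         dp[0][0], dp[0][1], dp[0][2] = 1, 1, 1
--     else:
--         dp[0][0], dp[0][1], dp[0][2], dp[0][3] = 1, 1, 1, 1
--
--     # 중앙 역삼각형의 소유를 어떤것이 하는가
--     # 만약 이전 선택에서 2를 안했다 ->
--         # tops == 0: 중앙 소유는 0,1,2 가능
--         # tops == 1: 중앙 소유는 0,1,2,3 가능.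
--     # 만약 이전 선택에서 2를 했다? ->
--         # tops == 0: 중앙소유는 0,2
--         # tops == 1: 중앙소유는 0,2,3
--
--     for i in range(1, n):
--         # 위에가 있으면
--         if tops[i] == 1:
--             for j in range(4):
--                 if j != 1:
--                     dp[i][j] = (dp[i-1][0] + dp[i-1][1] + dp[i-1][2] + dp[i-1][3])%10007
--                 else:
--                     dp[i][j] = (dp[i-1][0] + dp[i-1][1] + dp[i-1][3])%10007
--         # 위에가 없으면
--         else:
--             for j in range(3):
--                 if j != 1:
--                     dp[i][j] = (dp[i-1][0] + dp[i-1][1] + dp[i-1][2] + dp[i-1][3])%10007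
--                 else:
--                     dp[i][j] = (dp[i-1][0] + dp[i-1][1] + dp[i-1][3])%10007
--
--     return sum(dp[-1])% 10007
-- ===== SOURCE B (Python) =====
-- def solution(n, tops):
--     # Two-scalar recurrence: S = sum of previous dp column mod 10007, c = previous dp[.][2].
--     S = 3 if tops[0] == 0 else 4
--     c = 1
--     for i in range(1, n):
--         S, c = ((4 * S - c) if tops[i] == 1 else (3 * S - c)) % 10007, S
--     return S % 10007
-- ===== Notes on version B (the rewrite author's own statement) =====
-- stated objective: simpler
-- what changed: Replaces the n-row, 4-state dp table refilled by an inner j-loop with a single pass carrying just two scalars (the previous column sum S mod 10007 and the previous dp[..][2] value c) via the recurrence S' = (4S-c) or (3S-c) mod 10007.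
import Mathlib
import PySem

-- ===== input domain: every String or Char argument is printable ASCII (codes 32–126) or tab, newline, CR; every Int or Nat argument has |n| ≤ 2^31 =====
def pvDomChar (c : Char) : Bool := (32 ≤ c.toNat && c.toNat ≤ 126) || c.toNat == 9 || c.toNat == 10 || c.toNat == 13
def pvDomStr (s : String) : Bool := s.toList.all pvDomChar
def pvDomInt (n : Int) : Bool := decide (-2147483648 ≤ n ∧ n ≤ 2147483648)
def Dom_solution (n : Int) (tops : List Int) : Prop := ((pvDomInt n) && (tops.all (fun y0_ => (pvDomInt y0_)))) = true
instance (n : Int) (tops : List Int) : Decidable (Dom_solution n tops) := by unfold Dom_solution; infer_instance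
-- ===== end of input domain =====

-- B replaces A's n×4 dp table (refilled by an inner loop per column) with a two-scalar
-- recurrence (previous column sum S and previous dp[..][2] value c); objective: simpler.

-- ===== PORT A =====
-- loop body of 'for i in range(1, n)': reads dp[i-1], rewrites row dp[i] in place (inner j-loop)
def solutionBody (tops : List Int) (dp : List (List Int)) (i : Int) : List (List Int) :=
  let p0 := PySem.List.pyGetD (PySem.List.pyGetD dp (i-1) []) 0 0
  let p1 := PySem.List.pyGetD (PySem.List.pyGetD dp (i-1) []) 1 0
  let p2 := PySem.List.pyGetD (PySem.List.pyGetD dp (i-1) []) 2 0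
  let p3 := PySem.List.pyGetD (PySem.List.pyGetD dp (i-1) []) 3 0
  let row := PySem.List.pyGetD dp i []
  let row' :=
    if PySem.List.pyGetD tops i 0 = 1 then
      (PySem.List.pyRange 0 4 1).foldl (fun r j =>
        if j ≠ 1 then PySem.List.pySetD r j (PySem.Int.mod (p0 + p1 + p2 + p3) 10007)
        else PySem.List.pySetD r j (PySem.Int.mod (p0 + p1 + p3) 10007)) row
    else
      (PySem.List.pyRange 0 3 1).foldl (fun r j =>
        if j ≠ 1 then PySem.List.pySetD r j (PySem.Int.mod (p0 + p1 + p2 + p3) 10007)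
        else PySem.List.pySetD r j (PySem.Int.mod (p0 + p1 + p3) 10007)) row
  PySem.List.pySetD dp i row'

def solution (n : Int) (tops : List Int) : Int :=
  let dp0 : List (List Int) := (PySem.List.pyRange 0 n 1).map (fun _ => [0, 0, 0, 0])
  -- the simultaneous assignments to dp[0][0..2] (resp. dp[0][0..3])
  let dp1 : List (List Int) :=
    if PySem.List.pyGetD tops 0 0 = 0 then PySem.List.pySetD dp0 0 [1, 1, 1, 0]
    else PySem.List.pySetD dp0 0 [1, 1, 1, 1]
  let dpf := (PySem.List.pyRange 1 n 1).foldl (solutionBody tops) dp1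
  PySem.Int.mod ((PySem.List.pyGetD dpf (-1) []).foldl (· + ·) 0) 10007

-- ===== PORT B =====
def solution_alt (n : Int) (tops : List Int) : Int :=
  let S0 : Int := if PySem.List.pyGetD tops 0 0 = 0 then 3 else 4
  let sc := (PySem.List.pyRange 1 n 1).foldl
    (fun (sc : Int × Int) i =>
      (PySem.Int.mod (if PySem.List.pyGetD tops i 0 = 1 then 4 * sc.1 - sc.2
                      else 3 * sc.1 - sc.2) 10007, sc.1))
    (S0, 1)
  PySem.Int.mod sc.1 10007

-- ===== PRECONDITION & SPEC =====
-- A raises IndexError when n < 1 (dp[0] does not exist) or when len(tops) < n (tops[i]); Pre_ is exactly where A returns.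
def Pre_solution (n : Int) (tops : List Int) : Prop := 1 ≤ n ∧ n ≤ (tops.length : Int)
instance (n : Int) (tops : List Int) : Decidable (Pre_solution n tops) := by unfold Pre_solution; infer_instance
def pvWitness_solution : Int × List Int := (3, [1, 0, 1])

def Spec_solution (n : Int) (tops : List Int) (out : Int) : Prop := out = solution_alt n tops
instance (n : Int) (tops : List Int) (out : Int) : Decidable (Spec_solution n tops out) := by unfold Spec_solution; infer_instance

-- ===== CLAIM (what is proved, stated in full; the proofs are below) =====
def Claim_equal_solution : Prop := ∀ (n : Int) (tops : List Int), Dom_solution n tops → Pre_solution n tops → Spec_solution n tops (solution n tops)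

-- ===== LEMMAS AND PROOFS =====

def bStep (tops : List Int) : Int × Int → Int → Int × Int :=
  fun sc i => (PySem.Int.mod (if PySem.List.pyGetD tops i 0 = 1 then 4 * sc.1 - sc.2
               else 3 * sc.1 - sc.2) 10007, sc.1)

def bS0 (tops : List Int) : Int := if PySem.List.pyGetD tops 0 0 = 0 then 3 else 4

def aDP1 (n : Int) (tops : List Int) : List (List Int) :=
  if PySem.List.pyGetD tops 0 0 = 0 then
    PySem.List.pySetD ((PySem.List.pyRange 0 n 1).map (fun _ => [0, 0, 0, 0])) 0 [1, 1, 1, 0]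
  else
    PySem.List.pySetD ((PySem.List.pyRange 0 n 1).map (fun _ => [0, 0, 0, 0])) 0 [1, 1, 1, 1]

lemma solution_eq (n : Int) (tops : List Int) :
    solution n tops = PySem.Int.mod ((PySem.List.pyGetD ((PySem.List.pyRange 1 n 1).foldl
      (solutionBody tops) (aDP1 n tops)) (-1) []).foldl (· + ·) 0) 10007 := by
  unfold solution aDP1
  by_cases h : PySem.List.pyGetD tops 0 0 = 0 <;> simp [h]

lemma solution_alt_eq (n : Int) (tops : List Int) :
    solution_alt n tops = PySem.Int.mod
      (((PySem.List.pyRange 1 n 1).foldl (bStep tops) (bS0 tops, 1)).1) 10007 := rfl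

lemma set_zero {α : Type} (l : List α) (v : α) : PySem.List.pySetD l 0 v = l.set 0 v := by
  have h := PySem.List.pySetD_of_nonneg (xs := l) (v := v) (i := 0) (by norm_num)
  simpa using h

lemma inner4 (s t : Int) :
    (PySem.List.pyRange 0 4 1).foldl (fun r j =>
        if j = 1 then PySem.List.pySetD r j t else PySem.List.pySetD r j s) ([0,0,0,0] : List Int)
      = [s, t, s, s] := by
  simp [show PySem.List.pyRange 0 4 1 = [0,1,2,3] from by decide, List.foldl,
        PySem.List.pySetD, PySem.List.pySet?, PySem.List.pyIdx?]

lemma inner3 (s t : Int) :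
    (PySem.List.pyRange 0 3 1).foldl (fun r j =>
        if j = 1 then PySem.List.pySetD r j t else PySem.List.pySetD r j s) ([0,0,0,0] : List Int)
      = [s, t, s, 0] := by
  simp [show PySem.List.pyRange 0 3 1 = [0,1,2] from by decide, List.foldl,
        PySem.List.pySetD, PySem.List.pySet?, PySem.List.pyIdx?]

lemma loop_inv (n : Int) (tops : List Int) (hn1 : 1 ≤ n) (hn : n ≤ (tops.length : Int)) :
    ∀ j : Nat, 1 ≤ j → ((j : Int) ≤ n →
    ∃ S c y z : Int,
      (PySem.List.pyRange 1 (j : Int) 1).foldl (bStep tops) (bS0 tops, 1) = (S, c) ∧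
      ((PySem.List.pyRange 1 (j : Int) 1).foldl (solutionBody tops) (aDP1 n tops)).length = n.toNat ∧
      ((PySem.List.pyRange 1 (j : Int) 1).foldl (solutionBody tops) (aDP1 n tops))[j-1]? = some [c, y, c, z] ∧
      PySem.Int.mod (c + y + c + z) 10007 = S ∧ 0 ≤ S ∧ S < 10007 ∧
      (∀ k : Nat, j ≤ k → k < n.toNat →
        ((PySem.List.pyRange 1 (j : Int) 1).foldl (solutionBody tops) (aDP1 n tops))[k]? = some [0,0,0,0])) := by
  intro j hj
  induction j, hj using Nat.le_induction with
  | base =>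
    intro h1n
    have hr : PySem.List.pyRange 1 ((1:Nat) : Int) 1 = [] := by
      apply PySem.List.pyRange_one_eq_nil; norm_num
    have hl0 : 0 < ((PySem.List.pyRange 0 n 1).map
        (fun _ => ([0,0,0,0] : List Int))).length := by
      rw [List.length_map, PySem.List.length_pyRange_one]; omega
    rw [hr]
    simp only [List.foldl_nil]
    have hz : ∀ (k : Nat) (r : List Int), 1 ≤ k → k < n.toNat →
        (PySem.List.pySetD ((PySem.List.pyRange 0 n 1).map
          (fun _ => ([0,0,0,0] : List Int))) 0 r)[k]? = some [0,0,0,0] := by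
      intro k r hk1 hkn
      rw [set_zero, List.getElem?_set_ne (by omega), List.getElem?_map]
      have hk : k < (PySem.List.pyRange 0 n 1).length := by
        rw [PySem.List.length_pyRange_one]; omega
      rw [List.getElem?_eq_getElem hk]
      rfl
    by_cases h0 : PySem.List.pyGetD tops 0 0 = 0
    · refine ⟨3, 1, 1, 0, ?_, ?_, ?_, by decide, by norm_num, by norm_num, ?_⟩
      · simp [bS0, h0]
      · simp [aDP1, h0, PySem.List.length_pySetD, PySem.List.length_pyRange_one]
      · simp only [aDP1, if_pos h0, set_zero]
        exact List.getElem?_set_self hl0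
      · intro k hk1 hkn
        simp only [aDP1, if_pos h0]
        exact hz k _ hk1 hkn
    · refine ⟨4, 1, 1, 1, ?_, ?_, ?_, by decide, by norm_num, by norm_num, ?_⟩
      · simp [bS0, h0]
      · simp [aDP1, h0, PySem.List.length_pySetD, PySem.List.length_pyRange_one]
      · simp only [aDP1, if_neg h0, set_zero]
        exact List.getElem?_set_self hl0
      · intro k hk1 hkn
        simp only [aDP1, if_neg h0]
        exact hz k _ hk1 hkn
  | succ m hm ih =>
    intro hmn1
    have hmn : (m : Int) ≤ n := by push_cast at hmn1 ⊢; omega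
    obtain ⟨S, c, y, z, hsc, hlen, hget, hmod, hS0, hSlt, hzero⟩ := ih hmn
    have hmlen : m < tops.length := by
      have : ((m:Int) + 1) ≤ (tops.length : Int) := by push_cast at hmn1; omega
      omega
    have hmnt : m < n.toNat := by omega
    set DP := (PySem.List.pyRange 1 (m : Int) 1).foldl (solutionBody tops) (aDP1 n tops) with hDP
    have hDPm : DP[m]? = some [0,0,0,0] := hzero m le_rfl hmnt
    have hmDP : m < DP.length := by rw [hlen]; omega
    have hrange : PySem.List.pyRange 1 ((m+1 : Nat) : Int) 1
        = PySem.List.pyRange 1 (m : Int) 1 ++ [(m : Int)] := by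
      push_cast
      exact PySem.List.pyRange_one_succ_right (by exact_mod_cast hm)
    have hcast : (m : Int) - 1 = ((m - 1 : Nat) : Int) := by omega
    have hprev : PySem.List.pyGetD DP ((m : Int) - 1) [] = [c, y, c, z] := by
      rw [hcast]
      simp only [PySem.List.pyGetD, PySem.List.pyGet?_natCast]
      simp [hget]
    have hrow : PySem.List.pyGetD DP (m : Int) [] = [0,0,0,0] := by
      simp only [PySem.List.pyGetD, PySem.List.pyGet?_natCast]
      simp [hDPm]
    have htops : PySem.List.pyGetD tops (m : Int) 0 = tops[m] := by
      simp only [PySem.List.pyGetD, PySem.List.pyGet?_natCast]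
      rw [List.getElem?_eq_getElem hmlen]
      rfl
    have hset : ∀ row : List Int, PySem.List.pySetD DP (m : Int) row = DP.set m row := by
      intro row
      have h := PySem.List.pySetD_of_nonneg (xs := DP) (i := ((m : Nat) : Int)) (v := row)
        (by positivity)
      simpa using h
    have hMpos : (0:Int) < 10007 := by norm_num
    have hmod' : (c + y + c + z) % 10007 = S := by
      simp only [PySem.Int.mod_eq_emod_of_pos hMpos] at hmod; exact hmod
    by_cases ht : tops[m] = 1
    · have hbody : solutionBody tops DP ((m : Nat) : Int)
          = DP.set m [S, PySem.Int.mod (c + y + z) 10007, S, S] := by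
        simp only [solutionBody, hprev, hrow, htops]
        simp [PySem.List.pyGetD, PySem.List.pyGet?, PySem.List.pyIdx?, ht, hset]
        rw [inner4, hmod']
      have hfold : (PySem.List.pyRange 1 ((m+1 : Nat) : Int) 1).foldl (solutionBody tops)
          (aDP1 n tops) = DP.set m [S, PySem.Int.mod (c + y + z) 10007, S, S] := by
        rw [hrange, List.foldl_append, ← hDP]
        simp only [List.foldl_cons, List.foldl_nil]
        exact hbody
      have hsc' : (PySem.List.pyRange 1 ((m+1 : Nat) : Int) 1).foldl (bStep tops)
          (bS0 tops, 1) = (PySem.Int.mod (4 * S - c) 10007, S) := by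
        rw [hrange, List.foldl_append, hsc]
        simp [bStep, htops, ht]
      refine ⟨PySem.Int.mod (4 * S - c) 10007, S, PySem.Int.mod (c + y + z) 10007, S,
        hsc', ?_, ?_, ?_, PySem.Int.mod_nonneg _ (by norm_num),
        PySem.Int.mod_lt _ (by norm_num), ?_⟩
      · rw [hfold]; simp [hlen]
      · rw [hfold]
        have h1 : m + 1 - 1 = m := by omega
        rw [h1]
        exact List.getElem?_set_self hmDP
      · simp only [PySem.Int.mod_eq_emod_of_pos hMpos] at hmod ⊢
        omega
      · intro k hk hkn
        rw [hfold, List.getElem?_set_ne (by omega)]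
        exact hzero k (by omega) hkn
    · have hbody : solutionBody tops DP ((m : Nat) : Int)
          = DP.set m [S, PySem.Int.mod (c + y + z) 10007, S, 0] := by
        simp only [solutionBody, hprev, hrow, htops]
        simp [PySem.List.pyGetD, PySem.List.pyGet?, PySem.List.pyIdx?, ht, hset]
        rw [inner3, hmod']
      have hfold : (PySem.List.pyRange 1 ((m+1 : Nat) : Int) 1).foldl (solutionBody tops)
          (aDP1 n tops) = DP.set m [S, PySem.Int.mod (c + y + z) 10007, S, 0] := by
        rw [hrange, List.foldl_append, ← hDP]
        simp only [List.foldl_cons, List.foldl_nil]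
        exact hbody
      have hsc' : (PySem.List.pyRange 1 ((m+1 : Nat) : Int) 1).foldl (bStep tops)
          (bS0 tops, 1) = (PySem.Int.mod (3 * S - c) 10007, S) := by
        rw [hrange, List.foldl_append, hsc]
        simp [bStep, htops, ht]
      refine ⟨PySem.Int.mod (3 * S - c) 10007, S, PySem.Int.mod (c + y + z) 10007, 0,
        hsc', ?_, ?_, ?_, PySem.Int.mod_nonneg _ (by norm_num),
        PySem.Int.mod_lt _ (by norm_num), ?_⟩
      · rw [hfold]; simp [hlen]
      · rw [hfold]
        have h1 : m + 1 - 1 = m := by omega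
        rw [h1]
        exact List.getElem?_set_self hmDP
      · simp only [PySem.Int.mod_eq_emod_of_pos hMpos] at hmod ⊢
        omega
      · intro k hk hkn
        rw [hfold, List.getElem?_set_ne (by omega)]
        exact hzero k (by omega) hkn

lemma solution_agree : ∀ (n : Int) (tops : List Int), Pre_solution n tops → solution n tops = solution_alt n tops := by
  intro n tops hpre
  obtain ⟨hn1, hn⟩ := hpre
  have hjn : ((n.toNat : Nat) : Int) = n := Int.toNat_of_nonneg (by omega)
  obtain ⟨S, c, y, z, hsc, hlen, hget, hmod, hS0, hSlt, -⟩ :=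
    loop_inv n tops hn1 hn n.toNat (by omega) (by omega)
  rw [hjn] at hsc hlen hget
  rw [solution_eq, solution_alt_eq, hsc]
  have hlast : PySem.List.pyGetD ((PySem.List.pyRange 1 n 1).foldl (solutionBody tops)
      (aDP1 n tops)) (-1) [] = [c, y, c, z] := by
    simp only [PySem.List.pyGetD]
    rw [PySem.List.pyGet?_neg_one, List.getLast?_eq_getElem?, hlen, hget]
    rfl
  rw [hlast]
  simp only [List.foldl]
  have hz : (0 : Int) + c + y + c + z = c + y + c + z := by ring
  rw [hz, hmod]
  simp only [PySem.Int.mod_eq_emod_of_pos (by norm_num : (0:Int) < 10007)]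
  omega

-- ===== VERDICT (by name: the statement is the Claim_ definition above) =====
theorem solution_spec : Claim_equal_solution := by
  intro n tops _ hpre
  unfold Spec_solution
  exact solution_agree n tops hpre
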